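-- pv_equiv track=rewrite | github.com/nwclasantha/SOC-Defense-System | modules/CorrelationEngine.py | _detect_attack_progression
-- ===== SOURCE A (Python) =====
-- from typing import Dict, List, Any, Tuple, Optional
--
-- def _detect_attack_progression(events: List[Dict]) -> bool:
--     """Detect if events show attack progression"""
--     if len(events) < 2:
--         return False
--
--     # Known attack progressions
--     progressions = [
--         ["reconnaissance", "scanning", "exploitation"],
--         ["brute_force", "authentication_success", "lateral_movement"],
--         ["sql_injection", "command_injection", "data_exfiltration"],
--         ["xss", "csrf", "session_hijacking"]
--     ]
--
--     attack_types = [e.get("attack_type", "").lower() for e in events]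
--
--     # Check if events match any progression
--     for progression in progressions:
--         matched = 0
--         for attack_type in attack_types:
--             for stage in progression:
--                 if stage in attack_type:
--                     matched += 1
--                     break
--
--         if matched >= 2:
--             return True
--
--     return False
-- ===== SOURCE B (Python) =====
-- def _detect_attack_progression(events):
--     """Per-event hit-sets of progression indices; True exactly when an index
--     repeats across events, detected by set intersection with a 'seen' set."""
--     if len(events) < 2:
--         return False
--     progressions = [
--         ["reconnaissance", "scanning", "exploitation"],
--         ["brute_force", "authentication_success", "lateral_movement"],
--         ["sql_injection", "command_injection", "data_exfiltration"],
--         ["xss", "csrf", "session_hijacking"],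
--     ]
--     indexed = list(enumerate(progressions))
--     seen = set()
--     for e in events:
--         at = e.get("attack_type", "").lower()
--         hits = {i for i, p in indexed if any(stage in at for stage in p)}
--         if hits & seen:
--             return True
--         seen |= hits
--     return False
-- ===== Notes on version B (the rewrite author's own statement) =====
-- stated objective: alternative
-- what changed: A counts, per progression, how many events match it and compares the count with 2; B keeps no counts: it maps each event to the SET of progression indices it matches and returns True exactly when an index repeats, detected by intersecting each event's hit-set with an accumulated 'seen' set.
import Mathlib
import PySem

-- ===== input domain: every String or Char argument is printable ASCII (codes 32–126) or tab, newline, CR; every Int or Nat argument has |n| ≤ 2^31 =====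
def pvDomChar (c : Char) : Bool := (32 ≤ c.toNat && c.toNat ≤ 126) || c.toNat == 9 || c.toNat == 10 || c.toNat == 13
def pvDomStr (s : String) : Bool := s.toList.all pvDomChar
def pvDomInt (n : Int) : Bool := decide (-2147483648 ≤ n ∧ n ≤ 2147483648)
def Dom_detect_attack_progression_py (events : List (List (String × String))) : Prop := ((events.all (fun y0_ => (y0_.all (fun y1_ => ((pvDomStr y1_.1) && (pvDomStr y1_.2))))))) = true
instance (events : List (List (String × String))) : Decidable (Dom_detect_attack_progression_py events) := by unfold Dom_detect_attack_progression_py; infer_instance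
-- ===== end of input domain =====

-- B keeps no counters: it maps each event to the set of progression indices it matches and
-- returns True exactly when an index repeats, found by set intersection with an accumulated
-- 'seen' set; same boolean as A's per-progression count >= 2 (objective: alternative).


-- the literal table of known progressions (shared data of both programs)
def pvProgressions : List (List String) :=
  [["reconnaissance", "scanning", "exploitation"],
   ["brute_force", "authentication_success", "lateral_movement"],
   ["sql_injection", "command_injection", "data_exfiltration"],
   ["xss", "csrf", "session_hijacking"]]

-- ===== PORT A =====
def detect_attack_progression_py (events : List (List (String × String))) : Bool :=
  if events.length < 2 then false
  else
    let attack_types := events.map (fun e =>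
      PySem.Str.lower ((PySem.Dict.ofList e).getD "attack_type" ""))
    pvProgressions.any (fun progression =>
      let matched : Int := attack_types.foldl
        (fun matched attack_type =>
          if progression.any (fun stage => PySem.Str.isIn stage attack_type) then matched + 1
          else matched) 0
      2 ≤ matched)

-- ===== PORT B =====
-- the set of indices of the progressions that the lowered attack type matches
def pvHits (indexed : List (Int × List String)) (at_ : String) : PySem.Set Int :=
  PySem.Set.ofList
    ((indexed.filter (fun ip => ip.2.any (fun stage => PySem.Str.isIn stage at_))).map (fun ip => ip.1))

-- 'for e in events: … if hits & seen: return True; seen |= hits'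
def pvSeenLoop (indexed : List (Int × List String)) :
    List (List (String × String)) → PySem.Set Int → Bool
  | [], _ => false
  | e :: rest, seen =>
    let h := pvHits indexed (PySem.Str.lower ((PySem.Dict.ofList e).getD "attack_type" ""))
    if (PySem.Set.inter h seen).isEmpty then pvSeenLoop indexed rest (PySem.Set.union seen h)
    else true

def detect_attack_progression_py_alt (events : List (List (String × String))) : Bool :=
  if events.length < 2 then false
  else pvSeenLoop (PySem.List.enumerate pvProgressions 0) events PySem.Set.empty

-- ===== PRECONDITION & SPEC =====
def Spec_detect_attack_progression_py (events : List (List (String × String))) (out : Bool) : Prop := out = detect_attack_progression_py_alt events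
instance (events : List (List (String × String))) (out : Bool) : Decidable (Spec_detect_attack_progression_py events out) := by unfold Spec_detect_attack_progression_py; infer_instance

-- ===== CLAIM (what is proved, stated in full; the proofs are below) =====
def Claim_equal_detect_attack_progression_py : Prop := ∀ (events : List (List (String × String))), Dom_detect_attack_progression_py events → Spec_detect_attack_progression_py events (detect_attack_progression_py events)

-- ===== LEMMAS AND PROOFS =====

-- the lowered attack type of one event, and whether a progression matches it
def pvLowerAT (e : List (String × String)) : String :=
  PySem.Str.lower ((PySem.Dict.ofList e).getD "attack_type" "")

def pvHit (p : List String) (a : String) : Bool :=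
  p.any (fun stage => PySem.Str.isIn stage a)

lemma mem_pvHits (indexed : List (Int × List String)) (a : String) (i : Int) :
    i ∈ pvHits indexed a ↔ ∃ q ∈ indexed, q.1 = i ∧ pvHit q.2 a = true := by
  simp only [pvHits, PySem.Set.mem_ofList, List.mem_map, List.mem_filter, pvHit]
  constructor
  · rintro ⟨q, ⟨hq, hhit⟩, rfl⟩; exact ⟨q, hq, rfl, hhit⟩
  · rintro ⟨q, hq, rfl, hhit⟩; exact ⟨q, ⟨hq, hhit⟩, rfl⟩

lemma pvSeenLoop_eq (indexed : List (Int × List String))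
    (hinj : ∀ q ∈ indexed, ∀ q' ∈ indexed, q.1 = q'.1 → q = q')
    (events : List (List (String × String))) (seen : List Int) :
    pvSeenLoop indexed events seen =
      indexed.any (fun q =>
        (seen.contains q.1 && decide (1 ≤ (events.countP (fun e => pvHit q.2 (pvLowerAT e)) : Int)))
        || decide (2 ≤ (events.countP (fun e => pvHit q.2 (pvLowerAT e)) : Int))) := by
  induction events generalizing seen with
  | nil =>
    show false = indexed.any _
    symm
    rw [List.any_eq_false]
    intro q _
    simp
  | cons e rest ih =>
    rw [show pvSeenLoop indexed (e :: rest) seen =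
        (if (PySem.Set.inter (pvHits indexed (pvLowerAT e)) seen).isEmpty then
          pvSeenLoop indexed rest (PySem.Set.union seen (pvHits indexed (pvLowerAT e)))
        else true) from rfl]
    split_ifs with hemp
    · -- no intersection: recurse with seen ∪ hits
      have hdisj : ∀ x, ¬ (x ∈ pvHits indexed (pvLowerAT e) ∧ x ∈ seen) := by
        intro x ⟨hx1, hx2⟩
        rw [List.isEmpty_iff] at hemp
        have : x ∈ PySem.Set.inter (pvHits indexed (pvLowerAT e)) seen :=
          (PySem.Set.mem_inter _ _ _).2 ⟨hx1, hx2⟩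
        simp [hemp] at this
      rw [ih]
      apply PySem.List.any_congr_mem
      intro q hq
      have hmem : q.1 ∈ pvHits indexed (pvLowerAT e) ↔ pvHit q.2 (pvLowerAT e) = true := by
        rw [mem_pvHits]
        constructor
        · rintro ⟨q', hq', heq, hhit⟩
          rwa [hinj q' hq' q hq heq] at hhit
        · intro hhit; exact ⟨q, hq, rfl, hhit⟩
      have hcnt : (e :: rest).countP (fun e' => pvHit q.2 (pvLowerAT e')) =
          rest.countP (fun e' => pvHit q.2 (pvLowerAT e')) +
            (if pvHit q.2 (pvLowerAT e) then 1 else 0) := by rw [List.countP_cons]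
      cases hb : pvHit q.2 (pvLowerAT e) with
      | true =>
        have hnot : q.1 ∉ seen := fun hs => hdisj q.1 ⟨hmem.2 hb, hs⟩
        have hu : List.contains (PySem.Set.union seen (pvHits indexed (pvLowerAT e))) q.1 = true := by
          rw [List.contains_iff_mem, PySem.Set.mem_union]
          exact Or.inr (hmem.2 hb)
        have hs : List.contains seen q.1 = false := by
          rw [← Bool.not_eq_true, List.contains_iff_mem]; exact hnot
        rw [hu, hs, hcnt, hb]
        simp only [Bool.true_and, Bool.false_and, Bool.false_or]
        rw [← Bool.decide_or]
        exact decide_eq_decide.mpr (by push_cast; omega)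
      | false =>
        have hu : List.contains (PySem.Set.union seen (pvHits indexed (pvLowerAT e))) q.1 =
            List.contains seen q.1 := by
          cases hsq : List.contains seen q.1 with
          | true =>
            rw [List.contains_iff_mem, PySem.Set.mem_union]
            exact Or.inl (List.contains_iff_mem.1 hsq)
          | false =>
            rw [← Bool.not_eq_true, List.contains_iff_mem, PySem.Set.mem_union]
            rintro (h1 | h2)
            · rw [← List.contains_iff_mem, hsq] at h1; exact absurd h1 (by simp)
            · exact absurd (hmem.1 h2) (by simp [hb])
        rw [hu, hcnt, hb]
        simp
    · -- nonempty intersection: some index was seen before and is hit again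
      rw [Bool.not_eq_true, List.isEmpty_eq_false_iff_exists_mem] at hemp
      obtain ⟨x, hx⟩ := hemp
      rw [PySem.Set.mem_inter] at hx
      obtain ⟨hxh, hxs⟩ := hx
      rw [mem_pvHits] at hxh
      obtain ⟨q, hq, rfl, hhit⟩ := hxh
      symm
      rw [List.any_eq_true]
      refine ⟨q, hq, ?_⟩
      have hc : seen.contains q.1 = true := List.contains_iff_mem.2 hxs
      have hcnt : (e :: rest).countP (fun e' => pvHit q.2 (pvLowerAT e')) =
          rest.countP (fun e' => pvHit q.2 (pvLowerAT e')) + 1 := by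
        rw [List.countP_cons]; simp [hhit]
      rw [hc, hcnt, Bool.true_and]
      have : decide (1 ≤ ((rest.countP (fun e' => pvHit q.2 (pvLowerAT e')) + 1 : Nat) : Int)) = true := by
        rw [decide_eq_true_eq]; push_cast; omega
      rw [this, Bool.true_or]

lemma detect_A_char (events : List (List (String × String))) :
    detect_attack_progression_py events =
      if events.length < 2 then false
      else pvProgressions.any (fun p =>
        decide (2 ≤ (events.countP (fun e => pvHit p (pvLowerAT e)) : Int))) := by
  unfold detect_attack_progression_py
  split_ifs with hlen
  · rfl
  · apply PySem.List.any_congr_mem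
    intro p hp
    show decide (2 ≤ (events.map (fun e =>
        PySem.Str.lower ((PySem.Dict.ofList e).getD "attack_type" ""))).foldl
        (fun matched attack_type =>
          if p.any (fun stage => PySem.Str.isIn stage attack_type) then matched + 1
          else matched) 0) = _
    rw [PySem.List.foldl_if_add_one, List.countP_map, zero_add]
    rfl

-- ===== VERDICT (by name: the statement is the Claim_ definition above) =====
theorem detect_attack_progression_py_spec : Claim_equal_detect_attack_progression_py := by
  intro events _
  unfold Spec_detect_attack_progression_py detect_attack_progression_py_alt
  rw [detect_A_char]
  split_ifs with hlen
  · rfl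
  · rw [pvSeenLoop_eq _ (by
      intro q hq q' hq' heq
      rw [PySem.List.mem_enumerate_iff] at hq hq'
      obtain ⟨k, hk, rfl⟩ := hq
      obtain ⟨k', hk', rfl⟩ := hq'
      simp only [zero_add] at heq ⊢
      have : k = k' := by exact_mod_cast heq
      subst this; rfl)]
    rw [← PySem.List.map_snd_enumerate pvProgressions 0, List.any_map]
    apply PySem.List.any_congr_mem
    intro q hq
    show decide _ = ((PySem.Set.empty.contains q.1 && _) || _)
    simp [PySem.Set.empty]
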